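-- pv_equiv track=rewrite | github.com/gschen/where2go-python-test | 1806101049马原涛/math_project/wuliu/wuliu_code.py | one_route
-- ===== SOURCE A (Python) =====
-- def one_route(history):
--     total_history=[]
--     frequeny=len(history)
--     last_i = 0
--     for i in range(1,frequeny):
--
--         list_route = []
--
--         if history[i]==0:
--
--             for j in range(last_i,i):
--                 list_route.append(history[j])
--
--
--             total_history.append(list_route)
--             last_i=i
--     kis=0
--     for k in range(len(total_history)):
--         for y in range(len(total_history[k])):
--             kis+=1
--
--     list_route=[]
--     for k in range(len(history)-kis):
--         list_route.append(history[kis])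
--         kis+=1
--
--     total_history.append(list_route)
--     for b in range(len(total_history)):
--         total_history[b].append(0)
--     return total_history
-- ===== SOURCE B (Python) =====
-- def one_route(history):
--     result = []
--     current = history[:1]
--     for x in history[1:]:
--         if x == 0:
--             result.append(current)
--             current = []
--         current.append(x)
--     result.append(current)
--     return [seg + [0] for seg in result]
-- ===== Notes on version B (the rewrite author's own statement) =====
-- stated objective: simpler
-- what changed: Replaced A's three passes (zero-delimited segment collection with an inner index loop, a double loop counting consumed elements, and an index-arithmetic tail reconstruction) by one linear accumulator pass that pushes the current segment at each delimiter and once at the end.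
import Mathlib
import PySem

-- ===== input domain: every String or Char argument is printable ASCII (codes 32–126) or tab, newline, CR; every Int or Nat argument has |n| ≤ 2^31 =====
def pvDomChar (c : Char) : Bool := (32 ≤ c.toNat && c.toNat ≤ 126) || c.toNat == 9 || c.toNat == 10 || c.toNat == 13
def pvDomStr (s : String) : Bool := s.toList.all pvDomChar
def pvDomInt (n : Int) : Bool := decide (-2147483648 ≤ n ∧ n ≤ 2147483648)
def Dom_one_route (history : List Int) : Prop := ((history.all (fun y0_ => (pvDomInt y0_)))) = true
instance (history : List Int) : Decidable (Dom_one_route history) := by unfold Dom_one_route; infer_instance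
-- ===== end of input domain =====

-- B replaces A's three passes (segment collection, element recount, index-arithmetic tail rebuild)
-- by one linear accumulator pass; objective: simpler.

-- ===== PORT A =====
-- literal transliteration of A: first loop collects zero-delimited segments by index,
-- the double loop recounts the consumed elements into kis, the third loop rebuilds the
-- tail from index kis; the in-place `total_history[b].append(0)` loop is a map.
def one_route (history : List Int) : List (List Int) :=
  let frequeny : Int := history.length
  let st := (PySem.List.pyRange 1 frequeny 1).foldl
    (fun (st : List (List Int) × Int) i =>
      if PySem.List.pyGetD history i 0 = 0 then
        let list_route := (PySem.List.pyRange st.2 i 1).foldl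
          (fun acc j => acc ++ [PySem.List.pyGetD history j 0]) []
        (st.1 ++ [list_route], i)
      else st) ([], 0)
  let total_history := st.1
  let kis : Int := (PySem.List.pyRange 0 (total_history.length : Int) 1).foldl
    (fun kis k =>
      (PySem.List.pyRange 0 ((PySem.List.pyGetD total_history k []).length : Int) 1).foldl
        (fun kis _ => kis + 1) kis) 0
  let st2 := (PySem.List.pyRange 0 ((history.length : Int) - kis) 1).foldl
    (fun (st : List Int × Int) _ =>
      (st.1 ++ [PySem.List.pyGetD history st.2 0], st.2 + 1)) ([], kis)
  let total_history := total_history ++ [st2.1]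
  total_history.map (fun seg => seg ++ [0])

-- ===== PORT B =====
-- transliteration of Source B: one pass with accumulators (result, current).
def one_route_alt (history : List Int) : List (List Int) :=
  let st := (PySem.List.slice history (some 1) none).foldl
    (fun (st : List (List Int) × List Int) x =>
      let st' := if x = 0 then (st.1 ++ [st.2], ([] : List Int)) else st
      (st'.1, st'.2 ++ [x])) ([], PySem.List.slice history none (some 1))
  (st.1 ++ [st.2]).map (fun seg => seg ++ [0])

-- ===== PRECONDITION & SPEC =====
def Spec_one_route (history : List Int) (out : List (List Int)) : Prop := out = one_route_alt history
instance (history : List Int) (out : List (List Int)) : Decidable (Spec_one_route history out) := by unfold Spec_one_route; infer_instance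

-- ===== CLAIM (what is proved, stated in full; the proofs are below) =====
def Claim_equal_one_route : Prop := ∀ (history : List Int), Dom_one_route history → Spec_one_route history (one_route history)

-- ===== LEMMAS AND PROOFS =====

-- generic: counting loop adds the length
theorem pv_foldl_count (xs : List Int) (k : Int) :
    xs.foldl (fun k _ => k + 1) k = k + xs.length := by
  induction xs generalizing k with
  | nil => simp
  | cons x xs ih => simp [List.foldl, ih]; omega

-- A's inner segment loop builds the slice history[l:b]
theorem pv_seg_loop (history : List Int) (l b : Nat) (hl : l ≤ b) (hb : b ≤ history.length)
    (acc : List Int) :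
    (PySem.List.pyRange (l : Int) (b : Int) 1).foldl
      (fun acc j => acc ++ [PySem.List.pyGetD history j 0]) acc
      = acc ++ ((history.take b).drop l) := by
  induction b generalizing acc with
  | zero =>
    interval_cases l
    simp [PySem.List.pyRange_one_eq_nil]
  | succ b ih =>
    by_cases h : l = b + 1
    · subst h
      simp [PySem.List.pyRange_one_eq_nil]
    · have hl' : l ≤ b := by omega
      have hb' : b < history.length := by omega
      rw [show ((b + 1 : Nat) : Int) = (b : Int) + 1 by push_cast; ring,
        PySem.List.pyRange_one_succ_right (by exact_mod_cast hl'), List.foldl_append]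
      rw [ih hl' (by omega) acc]
      simp only [List.foldl]
      rw [PySem.List.pyGetD_natCast]
      rw [List.append_assoc]
      congr 1
      rw [List.take_succ, List.drop_append_of_le_length (by simp; omega)]
      simp [List.getD, hb']

-- A's kis double loop computes the total number of collected elements
theorem pv_foldl_sumlen (ts : List (List Int)) (k : Int) :
    ts.foldl (fun acc seg => acc + (seg.length : Int)) k = k + ((ts.map List.length).sum : Int) := by
  induction ts generalizing k with
  | nil => simp
  | cons t ts ih => simp [List.foldl, ih]; ring

theorem pv_kis (ts : List (List Int)) :
    (PySem.List.pyRange 0 (ts.length : Int) 1).foldl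
      (fun kis k =>
        (PySem.List.pyRange 0 ((PySem.List.pyGetD ts k []).length : Int) 1).foldl
          (fun kis _ => kis + 1) kis) 0
      = ((ts.map List.length).sum : Int) := by
  simp only [pv_foldl_count, PySem.List.length_pyRange_one]
  have h := PySem.List.foldl_pyRange_zero_pyGetD (xs := ts)
    (f := fun acc seg => acc + (seg.length : Int)) (d := []) (init := (0 : Int))
  simp only [Int.sub_zero, Int.toNat_natCast, PySem.List.len] at h ⊢
  rw [h, pv_foldl_sumlen]
  simp

-- A's tail loop appends history[l], history[l+1], … (c elements)
theorem pv_tail_loop (history : List Int) (c l : Nat) (h : l + c ≤ history.length)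
    (acc : List Int) :
    (PySem.List.pyRange 0 (c : Int) 1).foldl
      (fun (st : List Int × Int) _ =>
        (st.1 ++ [PySem.List.pyGetD history st.2 0], st.2 + 1)) (acc, (l : Int))
      = (acc ++ ((history.drop l).take c), (l : Int) + c) := by
  induction c with
  | zero => simp [PySem.List.pyRange_one_eq_nil]
  | succ c ih =>
    have hc : l + c < history.length := by omega
    rw [show ((c + 1 : Nat) : Int) = (c : Int) + 1 by push_cast; ring,
      PySem.List.pyRange_one_succ_right (by positivity), List.foldl_append,
      ih (by omega)]
    simp only [List.foldl]
    have : ((l : Int) + (c : Int)) = ((l + c : Nat) : Int) := by push_cast; ring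
    rw [this, PySem.List.pyGetD_natCast]
    simp only [Prod.mk.injEq]
    refine ⟨?_, ?_⟩
    · rw [List.append_assoc]
      congr 1
      rw [List.take_succ]
      congr 1
      have hlen : c < (history.drop l).length := by simp; omega
      rw [List.getElem?_eq_getElem hlen]
      simp [List.getElem_drop, List.getD, List.getElem?_eq_getElem hc]
    · push_cast; ring

-- the joint loop invariant: A's first loop state vs B's accumulator pass after m steps
theorem pv_main (history : List Int) (m : Nat) (hm : m + 1 ≤ history.length) :
    ∃ (l : Nat), l ≤ m + 1 ∧
      (PySem.List.pyRange 1 ((m : Int) + 1) 1).foldl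
        (fun (st : List (List Int) × Int) i =>
          if PySem.List.pyGetD history i 0 = 0 then
            let list_route := (PySem.List.pyRange st.2 i 1).foldl
              (fun acc j => acc ++ [PySem.List.pyGetD history j 0]) []
            (st.1 ++ [list_route], i)
          else st) ([], 0)
      = (((history.tail.take m).foldl
          (fun (st : List (List Int) × List Int) x =>
            let st' := if x = 0 then (st.1 ++ [st.2], ([] : List Int)) else st
            (st'.1, st'.2 ++ [x])) ([], history.take 1)).1, (l : Int)) ∧
      ((history.tail.take m).foldl
          (fun (st : List (List Int) × List Int) x =>
            let st' := if x = 0 then (st.1 ++ [st.2], ([] : List Int)) else st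
            (st'.1, st'.2 ++ [x])) ([], history.take 1)).2
        = (history.take (m + 1)).drop l ∧
      ((((history.tail.take m).foldl
          (fun (st : List (List Int) × List Int) x =>
            let st' := if x = 0 then (st.1 ++ [st.2], ([] : List Int)) else st
            (st'.1, st'.2 ++ [x])) ([], history.take 1)).1).map List.length).sum = l := by
  induction m with
  | zero =>
    refine ⟨0, by omega, ?_, ?_, ?_⟩ <;>
      simp [PySem.List.pyRange_one_eq_nil]
  | succ m ih =>
    obtain ⟨l, hl, hA, hcur, hsum⟩ := ih (by omega)
    have hx : m + 1 < history.length := by omega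
    have hxt : m < history.tail.length := by rw [List.length_tail]; omega
    have htake : history.tail.take (m + 1) = history.tail.take m ++ [history[m + 1]] := by
      rw [List.take_succ, List.getElem?_eq_getElem hxt, List.getElem_tail]; rfl
    have hrange : PySem.List.pyRange 1 (((m + 1 : Nat) : Int) + 1) 1
        = PySem.List.pyRange 1 ((m : Int) + 1) 1 ++ [(m : Int) + 1] := by
      rw [show (((m + 1 : Nat) : Int) + 1) = ((m : Int) + 1) + 1 by push_cast; ring,
        PySem.List.pyRange_one_succ_right (by omega)]
    have hget : PySem.List.pyGetD history ((m : Int) + 1) 0 = history[m + 1] := by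
      rw [show ((m : Int) + 1) = ((m + 1 : Nat) : Int) by push_cast; ring,
        PySem.List.pyGetD_natCast]
      simp [List.getD, List.getElem?_eq_getElem hx]
    have htk2 : history.take (m + 1 + 1) = history.take (m + 1) ++ [history[m + 1]] := by
      rw [List.take_succ, List.getElem?_eq_getElem hx]; rfl
    have hlen1 : (history.take (m + 1)).length = m + 1 := by
      rw [List.length_take]; omega
    rw [hrange, List.foldl_append, hA, htake, List.foldl_append]
    simp only [List.foldl_cons, List.foldl_nil, hget]
    by_cases hz : history[m + 1] = 0
    · -- delimiter: A pushes the slice, B pushes the current accumulator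
      have hseg : (PySem.List.pyRange (l : Int) ((m : Int) + 1) 1).foldl
          (fun acc j => acc ++ [PySem.List.pyGetD history j 0]) []
          = (history.take (m + 1)).drop l := by
        rw [show ((m : Int) + 1) = ((m + 1 : Nat) : Int) by push_cast; ring,
          pv_seg_loop history l (m + 1) (by omega) (by omega)]
        simp
      refine ⟨m + 1, by omega, ?_, ?_, ?_⟩
      · simp only [hz, if_pos rfl, hseg, hcur]
        push_cast
        rfl
      · simp only [hz, if_pos rfl, htk2]
        rw [List.drop_append_of_le_length (by omega), List.drop_eq_nil_of_le (by omega)]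
        simp
      · simp only [hz, ite_true, List.map_append, List.sum_append, hsum, hcur,
          List.map_cons, List.map_nil, List.sum_cons, List.sum_nil, List.length_drop, hlen1]
        omega
    · -- not a delimiter: A's state is unchanged, B extends the accumulator
      refine ⟨l, by omega, ?_, ?_, ?_⟩
      · simp [hz]
      · simp only [hz, if_neg hz, htk2]
        rw [List.drop_append_of_le_length (by omega)]
        simp [hcur]
      · simp [hz, hsum]

-- ===== VERDICT (by name: the statement is the Claim_ definition above) =====
theorem one_route_spec : Claim_equal_one_route := by
  intro history _
  unfold Spec_one_route
  cases history with
  | nil => rfl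
  | cons h hs =>
    obtain ⟨l, hl, hA, hcur, hsum⟩ := pv_main (h :: hs) hs.length (by simp)
    have htail : List.take hs.length (h :: hs).tail = (h :: hs).tail := by simp
    have htakeall : (h :: hs).take (hs.length + 1) = h :: hs := by
      apply List.take_of_length_le; simp
    have hslice1 : PySem.List.slice (h :: hs) (some 1) none = (h :: hs).tail := by
      simp [PySem.List.slice_from_one]
    have hslice2 : PySem.List.slice (h :: hs) none (some 1) = (h :: hs).take 1 := by
      have := PySem.List.slice_to (xs := h :: hs) (b := (1 : Int)) (by norm_num)
      simpa using this
    rw [htail] at hA hcur hsum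
    rw [htakeall] at hcur
    unfold one_route one_route_alt
    simp only [hslice1, hslice2, List.length_cons, Nat.cast_add, Nat.cast_one]
    rw [hA]
    simp only []
    rw [pv_kis, hsum]
    rw [show ((hs.length : Int) + 1 - (l : Int)) = ((hs.length + 1 - l : Nat) : Int) by push_cast; omega]
    rw [pv_tail_loop (h :: hs) (hs.length + 1 - l) l (by simp; omega) []]
    rw [hcur]
    have hta : (List.drop l (h :: hs)).take (hs.length + 1 - l) = List.drop l (h :: hs) := by
      apply List.take_of_length_le; simp
    simp [hta]
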